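-- pv_equiv track=rewrite | github.com/delfinaronco/algoritmos-1 | recu.py | valores_extremos
-- ===== SOURCE A (Python) =====
-- def valor_min (l: list) -> int:
--     min = 31
--
--     for element in l:
--         if element <= min:
--             min = element
--
--     return min
--
-- def valor_max (l: list) -> int:
--
--     max = 0
--     for element in l:
--         if element >= max:
--             max = element
--
--     return max
--
-- def valores_extremos (cotizaciones_diarias: dict) -> dict:
--     minmax = {}
--     for empresa, cotizaciones in cotizaciones_diarias.items():
--         lista = []
--         for cotizacion in cotizaciones:
--             lista.append(cotizacion[1])
--
--         minmax[empresa] = (valor_min(lista), valor_max(lista))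
--
--     return minmax
-- ===== SOURCE B (Python) =====
-- def valores_extremos(cotizaciones_diarias: dict) -> dict:
--     def extremos(cotizaciones):
--         mn, mx = 31, 0
--         for cotizacion in cotizaciones:
--             v = cotizacion[1]
--             mn = v if v <= mn else mn
--             mx = v if v >= mx else mx
--         return (mn, mx)
--     return {empresa: extremos(cotizaciones)
--             for empresa, cotizaciones in cotizaciones_diarias.items()}
-- ===== Notes on version B (the rewrite author's own statement) =====
-- stated objective: simpler
-- what changed: Replaces the intermediate value list and the two separate min/max helper passes with a dict comprehension over a single fused pass that maintains both extremes at once (keeping the 31/0 sentinels).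
import Mathlib
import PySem

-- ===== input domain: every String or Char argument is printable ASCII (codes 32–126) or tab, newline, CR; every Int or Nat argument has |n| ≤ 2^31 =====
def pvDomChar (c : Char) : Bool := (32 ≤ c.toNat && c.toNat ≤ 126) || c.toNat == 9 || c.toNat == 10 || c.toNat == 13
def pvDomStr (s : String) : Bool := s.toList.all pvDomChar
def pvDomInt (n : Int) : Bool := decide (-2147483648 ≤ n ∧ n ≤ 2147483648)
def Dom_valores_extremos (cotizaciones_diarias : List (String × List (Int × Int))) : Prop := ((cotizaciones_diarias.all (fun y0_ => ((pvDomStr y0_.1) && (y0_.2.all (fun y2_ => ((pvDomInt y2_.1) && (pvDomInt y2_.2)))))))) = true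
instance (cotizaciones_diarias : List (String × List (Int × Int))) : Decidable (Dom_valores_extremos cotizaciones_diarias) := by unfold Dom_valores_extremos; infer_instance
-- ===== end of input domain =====

-- B replaces the intermediate list and the two separate min/max helper passes with a
-- single fused pass per company inside a dict comprehension (objective: simpler).

-- ===== PORT A =====
def valor_min (l : List Int) : Int :=
  l.foldl (fun mn element => if element ≤ mn then element else mn) 31

def valor_max (l : List Int) : Int :=
  l.foldl (fun mx element => if element ≥ mx then element else mx) 0

def valores_extremos (cotizaciones_diarias : List (String × List (Int × Int))) : List (String × Int × Int) :=
  (cotizaciones_diarias.foldl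
    (fun (minmax : PySem.Dict String (Int × Int)) p =>
      let lista := p.2.foldl (fun lista cotizacion => lista ++ [cotizacion.2]) []
      minmax.insert p.1 (valor_min lista, valor_max lista))
    PySem.Dict.empty).items

-- ===== PORT B =====
def extremos (cotizaciones : List (Int × Int)) : Int × Int :=
  cotizaciones.foldl
    (fun (s : Int × Int) cotizacion =>
      let v := cotizacion.2
      (if v ≤ s.1 then v else s.1, if v ≥ s.2 then v else s.2))
    (31, 0)

def valores_extremos_alt (cotizaciones_diarias : List (String × List (Int × Int))) : List (String × Int × Int) :=
  cotizaciones_diarias.map (fun p => (p.1, extremos p.2))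

-- ===== PRECONDITION & SPEC =====
-- Pre_ excludes association lists with a duplicated empresa key: such a list does not
-- represent any Python dict argument (A's parameter is a dict, whose keys are unique).
def Pre_valores_extremos (cotizaciones_diarias : List (String × List (Int × Int))) : Prop :=
  (cotizaciones_diarias.map Prod.fst).Nodup
instance (cotizaciones_diarias : List (String × List (Int × Int))) : Decidable (Pre_valores_extremos cotizaciones_diarias) := by unfold Pre_valores_extremos; infer_instance

def pvWitness_valores_extremos : (List (String × List (Int × Int))) :=
  [("acme", [(1, 7), (2, 40)]), ("nil", [])]

def Spec_valores_extremos (cotizaciones_diarias : List (String × List (Int × Int))) (out : List (String × Int × Int)) : Prop := out = valores_extremos_alt cotizaciones_diarias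
instance (cotizaciones_diarias : List (String × List (Int × Int))) (out : List (String × Int × Int)) : Decidable (Spec_valores_extremos cotizaciones_diarias out) := by unfold Spec_valores_extremos; infer_instance

-- ===== CLAIM (what is proved, stated in full; the proofs are below) =====
def Claim_equal_valores_extremos : Prop := ∀ (cotizaciones_diarias : List (String × List (Int × Int))), Dom_valores_extremos cotizaciones_diarias → Pre_valores_extremos cotizaciones_diarias → Spec_valores_extremos cotizaciones_diarias (valores_extremos cotizaciones_diarias)

-- ===== LEMMAS AND PROOFS =====

-- A's list-building loop produces the list of second components.
theorem lista_eq_map (cs : List (Int × Int)) (acc : List Int) :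
    cs.foldl (fun lista cotizacion => lista ++ [cotizacion.2]) acc = acc ++ cs.map Prod.snd := by
  induction cs generalizing acc with
  | nil => simp
  | cons c cs ih => simp [List.foldl, ih]

-- The fused pass computes the pair of A's two separate passes.
theorem extremos_eq (cs : List (Int × Int)) : ∀ (mn mx : Int),
    cs.foldl
      (fun (s : Int × Int) cotizacion =>
        let v := cotizacion.2
        (if v ≤ s.1 then v else s.1, if v ≥ s.2 then v else s.2))
      (mn, mx)
    = ((cs.map Prod.snd).foldl (fun mn element => if element ≤ mn then element else mn) mn,
       (cs.map Prod.snd).foldl (fun mx element => if element ≥ mx then element else mx) mx) := by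
  induction cs with
  | nil => intro mn mx; simp
  | cons c cs ih => intro mn mx; simpa [List.foldl] using ih _ _

-- ===== VERDICT (by name: the statement is the Claim_ definition above) =====

theorem valores_extremos_spec : Claim_equal_valores_extremos := by
  intro d _ hpre
  unfold Spec_valores_extremos valores_extremos valores_extremos_alt
  rw [PySem.Dict.items_foldl_insert_fresh
        (l := d) (k := Prod.fst)
        (v := fun p =>
          (valor_min (p.2.foldl (fun lista cotizacion => lista ++ [cotizacion.2]) []),
           valor_max (p.2.foldl (fun lista cotizacion => lista ++ [cotizacion.2]) [])))
        (d := PySem.Dict.empty)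
        (by intro a _; simp [PySem.Dict.contains_empty]) hpre]
  simp only [PySem.Dict.empty, List.nil_append]
  apply List.map_congr_left
  intro p _
  simp only [extremos, valor_min, valor_max, lista_eq_map, List.nil_append, extremos_eq]
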